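-- pv_equiv track=rewrite | github.com/vatsalcode/LLM_Transformer_Queue | Abhishek Tyagi/arrayinter.py | circularSubarraySum1
-- ===== SOURCE A (Python) =====
-- def circularSubarraySum1(arr):
--     res = arr[0]
--     for i in range(0, len(arr)):
--         currsum = 0
--         for j in range(1, len(arr)):
--             idx = (i+j) % len(arr)
--             currsum += arr[idx]
--         res = max(res, currsum)
--     return res
-- ===== SOURCE B (Python) =====
-- def circularSubarraySum1(arr):
--     # closed form: each circular pass of length n-1 sums everything except one element
--     return max(arr[0], sum(arr) - min(arr))
-- ===== Notes on version B (the rewrite author's own statement) =====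
-- stated objective: faster
-- what changed: The O(n^2) double loop (each circular window of length n-1) is replaced by the closed form max(arr[0], sum(arr) - min(arr)), since every window's sum is total minus one element.
import Mathlib
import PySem

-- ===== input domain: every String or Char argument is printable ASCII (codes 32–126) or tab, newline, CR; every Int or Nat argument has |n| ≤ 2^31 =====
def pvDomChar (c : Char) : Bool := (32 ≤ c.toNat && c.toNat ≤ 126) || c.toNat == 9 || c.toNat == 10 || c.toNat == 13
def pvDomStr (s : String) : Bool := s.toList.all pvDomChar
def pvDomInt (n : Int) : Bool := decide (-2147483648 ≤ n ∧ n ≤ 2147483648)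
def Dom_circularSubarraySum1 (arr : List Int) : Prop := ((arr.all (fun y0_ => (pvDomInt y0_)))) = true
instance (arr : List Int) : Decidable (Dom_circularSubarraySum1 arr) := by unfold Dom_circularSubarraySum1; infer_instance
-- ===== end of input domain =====

-- B replaces A's O(n^2) double loop with the closed form max(arr[0], sum(arr) - min(arr)).
-- ===== PORT A =====
-- (Python's 'res = arr[0]' and 'arr[idx]' are pyGetD with default 0: arr[0] is in range under Pre_
--  (arr nonempty) and idx = (i+j) % len(arr) is always in range; the two 'let's of A are inlined.)
def circularSubarraySum1 (arr : List Int) : Int :=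
  (PySem.List.pyRange 0 (arr.length : Int) 1).foldl
    (fun res i =>
      max res ((PySem.List.pyRange 1 (arr.length : Int) 1).foldl
        (fun currsum j => currsum + PySem.List.pyGetD arr (PySem.Int.mod (i + j) (arr.length : Int)) 0) 0))
    (PySem.List.pyGetD arr 0 0)

-- ===== PORT B =====
def circularSubarraySum1_alt (arr : List Int) : Int :=
  max (PySem.List.pyGetD arr 0 0) (arr.sum - ((PySem.List.min? arr (fun y => y)).getD 0))

-- ===== PRECONDITION & SPEC =====
-- A evaluates arr[0] first, so it raises IndexError exactly on the empty list.
def Pre_circularSubarraySum1 (arr : List Int) : Prop := arr ≠ []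
instance (arr : List Int) : Decidable (Pre_circularSubarraySum1 arr) := by unfold Pre_circularSubarraySum1; infer_instance
def pvWitness_circularSubarraySum1 : List Int := [3, -1, 4]
def Spec_circularSubarraySum1 (arr : List Int) (out : Int) : Prop := out = circularSubarraySum1_alt arr
instance (arr : List Int) (out : Int) : Decidable (Spec_circularSubarraySum1 arr out) := by unfold Spec_circularSubarraySum1; infer_instance

-- ===== CLAIM (what is proved, stated in full; the proofs are below) =====
def Claim_equal_circularSubarraySum1 : Prop := ∀ (arr : List Int), Dom_circularSubarraySum1 arr → Pre_circularSubarraySum1 arr → Spec_circularSubarraySum1 arr (circularSubarraySum1 arr)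

-- ===== LEMMAS AND PROOFS =====

-- The i-th circular full window read by A is exactly arr rotated by i.
lemma pv_rot_map (arr : List Int) (i : Nat) :
    (PySem.List.pyRange 0 (arr.length : Int) 1).map
      (fun j => PySem.List.pyGetD arr (PySem.Int.mod ((i : Int) + j) (arr.length : Int)) 0)
    = arr.rotate i := by
  rcases Nat.eq_zero_or_pos arr.length with h | h
  · simp [List.eq_nil_of_length_eq_zero h, PySem.List.pyRange_one_eq_nil]
  apply List.ext_getElem
  · simp [PySem.List.length_pyRange_one, List.length_rotate]
  intro k hk hk2
  have hkn : k < arr.length := by simpa [List.length_rotate] using hk2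
  have hkr : k < (PySem.List.pyRange 0 (arr.length : Int) 1).length := by
    simpa [PySem.List.length_pyRange_one] using hkn
  rw [List.getElem_map, List.getElem_rotate]
  have hr : (PySem.List.pyRange 0 (arr.length : Int) 1)[k] = (k : Int) := by
    rw [PySem.List.getElem_pyRange_one]; ring
  rw [hr]
  have hcast : ((i : Int) + (k : Int)) = ((i + k : Nat) : Int) := by push_cast; ring
  have hm : PySem.Int.mod ((i : Int) + (k : Int)) (arr.length : Int)
      = (((i + k) % arr.length : Nat) : Int) := by
    rw [hcast]; exact_mod_cast PySem.Int.mod_natCast (i + k) arr.length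
  rw [hm, PySem.List.pyGetD_natCast]
  have hc : (i + k) % arr.length = (k + i) % arr.length := by rw [Nat.add_comm]
  rw [hc]
  exact List.getD_eq_getElem arr 0 _

-- A's inner loop over j ∈ range(1, n) sums everything except arr[i].
lemma pv_inner (arr : List Int) (i : Int) (h0 : 0 ≤ i) (h1 : i < (arr.length : Int)) :
    (PySem.List.pyRange 1 (arr.length : Int) 1).foldl
      (fun c j => c + PySem.List.pyGetD arr (PySem.Int.mod (i + j) (arr.length : Int)) 0) 0
    = arr.sum - PySem.List.pyGetD arr i 0 := by
  have hn : (0 : Int) < arr.length := lt_of_le_of_lt h0 h1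
  have hfull := pv_rot_map arr i.toNat
  rw [Int.toNat_of_nonneg h0] at hfull
  have hcons : PySem.List.pyRange 0 (arr.length : Int) 1
      = 0 :: PySem.List.pyRange 1 (arr.length : Int) 1 := by
    simpa using PySem.List.pyRange_one_cons hn
  rw [hcons, List.map_cons] at hfull
  have hs := congrArg List.sum hfull
  rw [List.sum_cons, (List.rotate_perm arr i.toNat).sum_eq] at hs
  have hmod0 : PySem.Int.mod (i + 0) (arr.length : Int) = i := by
    rw [add_zero, PySem.Int.mod_eq_emod_of_pos hn, Int.emod_eq_of_lt h0 h1]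
  rw [hmod0] at hs
  rw [PySem.List.foldl_add]
  omega

-- running max of S - x equals S - running min of x
lemma pv_maxfold (t : List Int) (S : Int) : ∀ (acc m : Int),
    t.foldl (fun r x => max r (S - x)) (max acc (S - m)) = max acc (S - t.foldl min m) := by
  induction t with
  | nil => intro acc m; rfl
  | cons x xs ih =>
    intro acc m
    have h1 : max (max acc (S - m)) (S - x) = max acc (S - min m x) := by omega
    simpa [List.foldl_cons, h1] using ih acc (min m x)

-- ===== VERDICT (by name: the statement is the Claim_ definition above) =====
theorem circularSubarraySum1_spec : Claim_equal_circularSubarraySum1 := by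
  intro arr _hdom hpre
  show circularSubarraySum1 arr = circularSubarraySum1_alt arr
  unfold circularSubarraySum1 circularSubarraySum1_alt
  rw [PySem.List.foldl_congr_mem _ _
      (fun res i => max res (arr.sum - PySem.List.pyGetD arr i 0)) _ ?hcong]
  case hcong =>
    intro acc x hx
    obtain ⟨hx0, hx1⟩ := (PySem.List.mem_pyRange_one).1 hx
    rw [pv_inner arr x hx0 hx1]
  rw [PySem.List.foldl_pyRange_zero_pyGetD' arr 0 (fun res v => max res (arr.sum - v))]
  obtain ⟨a, t, rfl⟩ := List.exists_cons_of_ne_nil hpre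
  rw [List.foldl_cons, PySem.List.pyGetD_zero_cons, PySem.List.min?_id_cons, Option.getD_some]
  exact pv_maxfold t (a :: t).sum a a
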